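-- pv_equiv track=rewrite | github.com/wehr-to/netmiko-ops-scripts | automation_ops/security_hardening/disable_telnet.py | parse_telnet_usage
-- ===== SOURCE A (Python) =====
-- from typing import List, Dict
--
-- def parse_telnet_usage(output: str) -> List[Dict[str, str]]:
--     results = []
--     lines = output.splitlines()
--     current_vty = None
--     telnet_enabled = False
--     for line in lines:
--         if line.strip().startswith("line vty"):
--             if current_vty is not None:
--                 results.append({"VTY Line": current_vty, "Telnet Enabled": "Yes" if telnet_enabled else "No"})
--             current_vty = line.strip()
--             telnet_enabled = False
--         elif "transport input" in line and current_vty: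
--             if "telnet" in line:
--                 telnet_enabled = True
--     if current_vty is not None:
--         results.append({"VTY Line": current_vty, "Telnet Enabled": "Yes" if telnet_enabled else "No"})
--     return results
-- ===== SOURCE B (Python) =====
-- from typing import List, Dict
--
-- def parse_telnet_usage(output: str) -> List[Dict[str, str]]:
--     # Phase 1: group the lines into per-VTY blocks ([stripped header, *body lines]);
--     # lines before the first header are dropped.
--     blocks: List[List[str]] = []
--     for line in output.splitlines():
--         if line.strip().startswith("line vty"):
--             blocks.append([line.strip()])
--         elif blocks:
--             blocks[-1].append(line)
--     # Phase 2: map each block to its summary dict.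
--     return [
--         {"VTY Line": blk[0],
--          "Telnet Enabled": "Yes" if any("transport input" in l and "telnet" in l
--                                         for l in blk[1:]) else "No"}
--         for blk in blocks
--     ]
-- ===== Notes on version B (the rewrite author's own statement) =====
-- stated objective: simpler
-- what changed: Replaced A's flush-on-next-header state machine (pending header + telnet flag, emitted on the next header and again after the loop) by a group-then-map decomposition: first collect per-VTY blocks, then map each block to its dict with any() over its body.
import Mathlib
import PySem

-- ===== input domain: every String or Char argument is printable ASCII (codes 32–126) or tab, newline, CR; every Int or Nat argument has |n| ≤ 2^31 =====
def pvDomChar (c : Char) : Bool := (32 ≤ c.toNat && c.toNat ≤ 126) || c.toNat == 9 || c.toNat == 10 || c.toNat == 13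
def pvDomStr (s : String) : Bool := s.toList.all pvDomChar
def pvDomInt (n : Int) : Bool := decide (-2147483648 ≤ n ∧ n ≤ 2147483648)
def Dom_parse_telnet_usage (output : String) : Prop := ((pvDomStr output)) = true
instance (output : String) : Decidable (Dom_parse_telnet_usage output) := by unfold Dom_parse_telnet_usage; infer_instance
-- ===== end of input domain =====

-- B replaces A's flush-on-next-header state machine by a group-the-lines-then-map decomposition (objective: simpler).

-- ===== PORT A =====
-- line.strip().startswith("line vty")  (both Pythons compute this test verbatim)
def pvIsHeader (line : String) : Bool :=
  PySem.Str.startswith (PySem.Str.strip line) "line vty"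

-- Python truthiness of the Optional[str] current_vty: not None and non-empty
def pvTruthy : Option String → Bool
  | some c => c != ""
  | none => false

def pvEntry (c : String) (tel : Bool) : List (String × String) :=
  [("VTY Line", c), ("Telnet Enabled", if tel then "Yes" else "No")]

def pvAStep (st : List (List (String × String)) × Option String × Bool) (line : String) :
    List (List (String × String)) × Option String × Bool :=
  let (res, cur, tel) := st
  if pvIsHeader line then
    ((match cur with | some c => res ++ [pvEntry c tel] | none => res),
     some (PySem.Str.strip line), false)
  else if PySem.Str.isIn "transport input" line && pvTruthy cur then
    (if PySem.Str.isIn "telnet" line then (res, cur, true) else (res, cur, tel))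
  else (res, cur, tel)

def parse_telnet_usage (output : String) : List (List (String × String)) :=
  let st := (PySem.Str.splitlines output).foldl pvAStep ([], none, false)
  match st.2.1 with
  | some c => st.1 ++ [pvEntry c st.2.2]
  | none => st.1

-- ===== PORT B =====
def pvTelnetLine (l : String) : Bool :=
  PySem.Str.isIn "transport input" l && PySem.Str.isIn "telnet" l

def pvBStep (blocks : List (List String)) (line : String) : List (List String) :=
  if pvIsHeader line then
    blocks ++ [[PySem.Str.strip line]]
  else if !blocks.isEmpty then
    -- blocks[-1].append(line)
    blocks.dropLast ++ [blocks.getLastD [] ++ [line]]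
  else blocks

def pvRender (blk : List String) : List (String × String) :=
  [("VTY Line", blk.headD ""),
   ("Telnet Enabled", if blk.tail.any pvTelnetLine then "Yes" else "No")]

def parse_telnet_usage_alt (output : String) : List (List (String × String)) :=
  ((PySem.Str.splitlines output).foldl pvBStep []).map pvRender

-- ===== PRECONDITION & SPEC =====
def Spec_parse_telnet_usage (output : String) (out : List (List (String × String))) : Prop := out = parse_telnet_usage_alt output
instance (output : String) (out : List (List (String × String))) : Decidable (Spec_parse_telnet_usage output out) := by unfold Spec_parse_telnet_usage; infer_instance

-- ===== CLAIM (what is proved, stated in full; the proofs are below) =====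
def Claim_equal_parse_telnet_usage : Prop := ∀ (output : String), Dom_parse_telnet_usage output → Spec_parse_telnet_usage output (parse_telnet_usage output)

-- ===== LEMMAS AND PROOFS =====

-- The invariant tying A's loop state (emitted rows, pending header, telnet flag)
-- to B's block list: B's rendered blocks are A's rows plus the pending row.
def pvRel (res : List (List (String × String))) (cur : Option String) (tel : Bool)
    (blocks : List (List String)) : Prop :=
  match cur with
  | none => res = [] ∧ blocks = []
  | some c => c ≠ "" ∧ ∃ bs b, blocks = bs ++ [b] ∧ b ≠ [] ∧
      res = bs.map pvRender ∧ b.headD "" = c ∧ b.tail.any pvTelnetLine = tel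

def pvFinalize (st : List (List (String × String)) × Option String × Bool) :
    List (List (String × String)) :=
  match st.2.1 with
  | some c => st.1 ++ [pvEntry c st.2.2]
  | none => st.1

theorem pv_strip_ne_empty (line : String) (h : pvIsHeader line = true) :
    PySem.Str.strip line ≠ "" := by
  intro he
  rw [pvIsHeader, he] at h
  revert h
  decide

theorem pv_headD_append (b : List String) (l : String) (hb : b ≠ []) :
    (b ++ [l]).headD "" = b.headD "" := by
  cases b with
  | nil => exact absurd rfl hb
  | cons x xs => simp

set_option maxHeartbeats 1000000 in
theorem pvRel_step (res : List (List (String × String))) (cur : Option String) (tel : Bool)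
    (blocks : List (List String)) (line : String) (h : pvRel res cur tel blocks) :
    pvRel (pvAStep (res, cur, tel) line).1 (pvAStep (res, cur, tel) line).2.1
      (pvAStep (res, cur, tel) line).2.2 (pvBStep blocks line) := by
  by_cases hh : pvIsHeader line = true
  · -- header line: A flushes its pending row, B opens a new block
    simp only [pvAStep, pvBStep, hh, if_true, pvRel]
    refine ⟨pv_strip_ne_empty line hh, blocks, [PySem.Str.strip line], rfl, by simp, ?_, rfl, rfl⟩
    cases cur with
    | none =>
      obtain ⟨hres, hbl⟩ := h
      simp [hres, hbl]
    | some c =>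
      obtain ⟨hc, bs, b, hbl, hb, hres, hhd, htl⟩ := h
      simp only [hbl, hres, List.map_append, List.map_cons, List.map_nil, pvRender, hhd, htl,
        pvEntry]
  · have hh' : pvIsHeader line = false := Bool.eq_false_iff.mpr hh
    cases cur with
    | none =>
      obtain ⟨hres, hbl⟩ := h
      simp only [pvAStep, pvBStep, hh', Bool.false_eq_true, if_false, pvTruthy, Bool.and_false,
        hbl, List.isEmpty_nil, Bool.not_true, pvRel]
      exact ⟨hres, trivial⟩
    | some c =>
      obtain ⟨hc, bs, b, hbl, hb, hres, hhd, htl⟩ := h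
      have hne : blocks.isEmpty = false := by simp [hbl]
      have hB : pvBStep blocks line = bs ++ [b ++ [line]] := by
        simp only [pvBStep, hh', Bool.false_eq_true, if_false, hne, hbl]
        simp
      have htail : (b ++ [line]).tail = b.tail ++ [line] := by
        cases b with
        | nil => exact absurd rfl hb
        | cons x xs => simp
      have hrel : ∀ t, (b.tail.any pvTelnetLine || pvTelnetLine line) = t →
          pvRel res (some c) t (pvBStep blocks line) := by
        intro t ht
        exact ⟨hc, bs, b ++ [line], hB, by simp, hres,
          by rw [pv_headD_append b line hb, hhd],
          by rw [htail, List.any_append, List.any_cons, List.any_nil, Bool.or_false, ht]⟩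
      have hct : pvTruthy (some c) = true := by simp [pvTruthy, hc]
      by_cases ht : PySem.Str.isIn "transport input" line = true
      · by_cases htel : PySem.Str.isIn "telnet" line = true
        · have hT : pvTelnetLine line = true := by
            simp only [pvTelnetLine, ht, htel, Bool.and_self]
          have := hrel true (by rw [hT, Bool.or_true])
          simpa only [pvAStep, hh', Bool.false_eq_true, if_false, ht, hct, Bool.and_self,
            if_true, htel] using this
        · have htel' : PySem.Str.isIn "telnet" line = false := Bool.eq_false_iff.mpr htel
          have hT : pvTelnetLine line = false := by
            simp only [pvTelnetLine, ht, htel', Bool.and_false]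
          have := hrel tel (by rw [hT, Bool.or_false]; exact htl)
          simpa only [pvAStep, hh', Bool.false_eq_true, if_false, ht, hct, Bool.and_self,
            if_true, htel', htel] using this
      · have ht' : PySem.Str.isIn "transport input" line = false := Bool.eq_false_iff.mpr ht
        have hT : pvTelnetLine line = false := by
          simp only [pvTelnetLine, ht', Bool.false_and]
        have := hrel tel (by rw [hT, Bool.or_false]; exact htl)
        simpa only [pvAStep, hh', Bool.false_eq_true, if_false, ht', Bool.false_and] using this

theorem pvLoop (lines : List String) :
    ∀ (res : List (List (String × String))) (cur : Option String) (tel : Bool)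
      (blocks : List (List String)), pvRel res cur tel blocks →
      pvFinalize (lines.foldl pvAStep (res, cur, tel)) =
        (lines.foldl pvBStep blocks).map pvRender := by
  induction lines with
  | nil =>
    intro res cur tel blocks h
    cases cur with
    | none =>
      obtain ⟨hres, hbl⟩ := h
      simp [pvFinalize, hres, hbl]
    | some c =>
      obtain ⟨hc, bs, b, hbl, hb, hres, hhd, htl⟩ := h
      simp only [List.foldl_nil, pvFinalize, hres, hbl, List.map_append, List.map_cons,
        List.map_nil, pvRender, hhd, htl, pvEntry]
  | cons line rest ih =>
    intro res cur tel blocks h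
    have h' := pvRel_step res cur tel blocks line h
    simp only [List.foldl_cons]
    rcases hA : pvAStep (res, cur, tel) line with ⟨res', cur', tel'⟩
    rw [hA] at h'
    exact ih res' cur' tel' _ h'

-- ===== VERDICT (by name: the statement is the Claim_ definition above) =====
theorem parse_telnet_usage_spec : Claim_equal_parse_telnet_usage := by
  intro output _
  unfold Spec_parse_telnet_usage parse_telnet_usage parse_telnet_usage_alt
  have := pvLoop (PySem.Str.splitlines output) [] none false [] ⟨rfl, rfl⟩
  simpa [pvFinalize] using this
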